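-- pv_equiv track=rewrite | github.com/TTLucian/ha-climate-react | custom_components/climate_react/config_flow.py | _validate_entity_domain
-- ===== SOURCE A (Python) =====
-- def _validate_entity_domain(
--
--     entity_id: str,
--     allowed_domains: list[str],
--     field_name: str,
--     errors: dict[str, str],
-- ) -> bool:
--     """Validate that an entity belongs to allowed domains.
--
--     Args:
--         entity_id: The entity ID to validate
--         allowed_domains: List of allowed domain prefixes
--         field_name: The field name for error reporting
--         errors: Dictionary to store validation errors
--
--     Returns:
--         True if entity domain is allowed, False otherwise
--     """
--     if not any(entity_id.startswith(domain + ".") for domain in allowed_domains):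
--         errors[field_name] = "invalid_domain"
--         return False
--     return True
-- ===== SOURCE B (Python) =====
-- def _validate_entity_domain(
--     entity_id: str,
--     allowed_domains: list[str],
--     field_name: str,
--     errors: dict[str, str],
-- ) -> bool:
--     """Validate that an entity belongs to allowed domains.
--
--     Instead of testing entity_id against every 'domain + "."' prefix, build the
--     domain set once and scan entity_id's dots: the entity is valid iff the text
--     before some '.' is an allowed domain.
--     """
--     domains = set(allowed_domains)
--     if any(entity_id[:i] in domains for i, ch in enumerate(entity_id) if ch == "."):
--         return True
--     errors[field_name] = "invalid_domain"
--     return False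
-- ===== Notes on version B (the rewrite author's own statement) =====
-- stated objective: alternative
-- what changed: Instead of scanning the whole domain list with startswith(domain + '.') for each domain, B builds the domain set once and scans entity_id's '.' positions, testing whether the prefix before a dot is in the set.
import Mathlib
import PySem

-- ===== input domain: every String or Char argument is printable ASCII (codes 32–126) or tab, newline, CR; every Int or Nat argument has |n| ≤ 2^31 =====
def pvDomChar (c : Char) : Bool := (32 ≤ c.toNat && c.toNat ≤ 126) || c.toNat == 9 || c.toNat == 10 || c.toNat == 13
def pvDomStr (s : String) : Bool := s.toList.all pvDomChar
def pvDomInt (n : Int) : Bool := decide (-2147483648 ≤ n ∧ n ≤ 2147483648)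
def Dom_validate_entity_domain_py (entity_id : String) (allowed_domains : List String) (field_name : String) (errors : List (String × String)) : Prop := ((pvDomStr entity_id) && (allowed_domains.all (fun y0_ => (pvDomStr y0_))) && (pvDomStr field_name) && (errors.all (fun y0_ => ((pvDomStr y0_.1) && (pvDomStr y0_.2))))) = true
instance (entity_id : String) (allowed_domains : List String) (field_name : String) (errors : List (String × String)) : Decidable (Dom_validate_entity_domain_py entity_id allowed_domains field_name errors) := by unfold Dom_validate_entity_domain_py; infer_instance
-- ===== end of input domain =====

-- B replaces A's scan of the domain list with startswith(domain + ".") by one pass over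
-- entity_id's '.' positions against the domain set (objective: alternative, same result).
-- Both A and B mutate `errors` identically (errors[field_name] = "invalid_domain" on failure);
-- the equivalence proved here is about the returned Bool.


-- ===== PORT A =====
-- if not any(entity_id.startswith(domain + ".") for domain in allowed_domains):
--     errors[field_name] = "invalid_domain"   (mutation of the caller's dict; return value ported)
--     return False
-- return True
def validate_entity_domain_py (entity_id : String) (allowed_domains : List String) (field_name : String) (errors : List (String × String)) : Bool :=
  if !(allowed_domains.any (fun domain => PySem.Chars.startswith entity_id.toList (domain.toList ++ ['.']))) then
    false
  else
    true

-- ===== PORT B =====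
-- domains = set(allowed_domains)
-- if any(entity_id[:i] in domains for i, ch in enumerate(entity_id) if ch == "."): return True
-- errors[field_name] = "invalid_domain"; return False
def validate_entity_domain_py_alt (entity_id : String) (allowed_domains : List String) (field_name : String) (errors : List (String × String)) : Bool :=
  -- domains = set(allowed_domains)
  if (PySem.List.enumerate entity_id.toList 0).any (fun p =>
       p.2 == '.' && PySem.Set.contains (PySem.Set.ofList (allowed_domains.map String.toList))
         (PySem.List.slice entity_id.toList none (some p.1))) then
    true
  else
    false

-- ===== PRECONDITION & SPEC =====
def Spec_validate_entity_domain_py (entity_id : String) (allowed_domains : List String) (field_name : String) (errors : List (String × String)) (out : Bool) : Prop := out = validate_entity_domain_py_alt entity_id allowed_domains field_name errors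
instance (entity_id : String) (allowed_domains : List String) (field_name : String) (errors : List (String × String)) (out : Bool) : Decidable (Spec_validate_entity_domain_py entity_id allowed_domains field_name errors out) := by unfold Spec_validate_entity_domain_py; infer_instance

-- ===== CLAIM (what is proved, stated in full; the proofs are below) =====
def Claim_equal_validate_entity_domain_py : Prop := ∀ (entity_id : String) (allowed_domains : List String) (field_name : String) (errors : List (String × String)), Dom_validate_entity_domain_py entity_id allowed_domains field_name errors → Spec_validate_entity_domain_py entity_id allowed_domains field_name errors (validate_entity_domain_py entity_id allowed_domains field_name errors)

-- ===== LEMMAS AND PROOFS =====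

-- Some allowed domain d satisfies (d ++ ".") <+: cs  iff  some '.' in cs has the text before it in the set.
lemma main_any (cs : List Char) (l : List (List Char)) :
    l.any (fun d => PySem.Chars.startswith cs (d ++ ['.'])) =
    (PySem.List.enumerate cs 0).any (fun p =>
      p.2 == '.' && PySem.Set.contains (PySem.Set.ofList l) (PySem.List.slice cs none (some p.1))) := by
  rw [Bool.eq_iff_iff]
  simp only [List.any_eq_true, PySem.Chars.startswith_iff, PySem.List.mem_enumerate_iff,
    Bool.and_eq_true, beq_iff_eq, PySem.Set.contains_iff, PySem.Set.mem_ofList]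
  constructor
  · rintro ⟨d, hd, t, ht⟩
    subst ht
    have hlen : d.length < (d ++ ['.'] ++ t).length := by simp
    refine ⟨((d.length : Int), '.'), ⟨d.length, hlen, ?_⟩, rfl, ?_⟩
    · simp
    · rw [PySem.List.slice_to_natCast]
      simpa using hd
  · rintro ⟨⟨i, c⟩, ⟨k, hk, hp⟩, hdot, hmem⟩
    simp only [Prod.mk.injEq] at hp
    obtain ⟨h1, h2⟩ := hp
    simp only at hdot
    refine ⟨cs.take k, ?_, cs.drop (k + 1), ?_⟩
    · rw [h1, zero_add, PySem.List.slice_to_natCast] at hmem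
      simpa using hmem
    · rw [List.append_assoc]
      have : '.' :: cs.drop (k + 1) = cs.drop k := by
        rw [← hdot, h2, List.drop_eq_getElem_cons hk]
      rw [List.singleton_append, this, List.take_append_drop]

-- ===== VERDICT (by name: the statement is the Claim_ definition above) =====
theorem validate_entity_domain_py_spec : Claim_equal_validate_entity_domain_py := by
  intro entity_id allowed_domains field_name errors _hDom
  unfold Spec_validate_entity_domain_py validate_entity_domain_py validate_entity_domain_py_alt
  have h : allowed_domains.any (fun domain => PySem.Chars.startswith entity_id.toList (domain.toList ++ ['.'])) =
      (allowed_domains.map String.toList).any (fun d => PySem.Chars.startswith entity_id.toList (d ++ ['.'])) := by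
    rw [List.any_map]; rfl
  rw [h, main_any entity_id.toList (allowed_domains.map String.toList)]
  generalize (PySem.List.enumerate entity_id.toList 0).any (fun p =>
      p.2 == '.' && PySem.Set.contains (PySem.Set.ofList (allowed_domains.map String.toList))
        (PySem.List.slice entity_id.toList none (some p.1))) = b
  cases b <;> rfl
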